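-- pv_equiv track=rewrite | github.com/joeljohansson99/adventofcode | 2025/src/day6.py | part2
-- ===== SOURCE A (Python) =====
-- def part2(input):
--     rows = len(input[:-1])
--     nums = [[] for _ in range(rows)]
--     ns = ["" for _ in range(rows)]
--     for c in range(len(input[0])):
--         if all([input[r][c] == " " for r in range(rows)]):
--             for r in range(rows):
--                 nums[r].append(ns[r])
--                 ns[r] = ""
--             continue
--         for r in range(rows):
--             ns[r] += input[r][c]
--     for r in range(rows):
--         nums[r].append(ns[r])
--
--     ops = input[-1].split(" ")
--     ops = [o for o in ops if o != ""]
--     total = 0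
--     for c in range(len(ops)):
--         col = 0 if ops[c] == "+" else 1
--         targets = []
--         for r in range(len(nums)):
--             targets.append(nums[r][c])
--         new_nums = []
--         for i in range(len(targets[0])-1,-1,-1):
--             new_num = ""
--             for r in range(len(targets)):
--                 new_num += str(targets[r][i])
--             if "".join(new_num.split(" ")) == "":
--                 new_nums.append(0)
--             else:
--                 new_nums.append(int("".join(new_num.split(" "))))
--         for r in range(len(new_nums)):
--             if ops[c] == "+":
--                 col += new_nums[r]
--             else:
--                 col *= new_nums[r]
--         total += col
--     return total
-- ===== SOURCE B (Python) =====
-- def part2(input):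
--     rows = input[:-1]
--     width = len(input[0])
--     seps = [c for c in range(width) if all(r[c] == " " for r in rows)]
--     bounds = []
--     start = 0
--     for c in seps:
--         bounds.append((start, c))
--         start = c + 1
--     bounds.append((start, width))
--     ops = [o for o in input[-1].split(" ") if o != ""]
--     total = 0
--     for k in range(len(ops)):
--         lo, hi = bounds[k]
--         acc = 0 if ops[k] == "+" else 1
--         for j in range(lo, hi):
--             s = "".join(r[j] for r in rows).replace(" ", "")
--             v = int(s) if s != "" else 0
--             acc = acc + v if ops[k] == "+" else acc * v
--         total += acc
--     return total
-- ===== Notes on version B (the rewrite author's own statement) =====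
-- stated objective: simpler
-- what changed: B replaces A's char-by-char column scan with per-row accumulator strings and flush-on-blank-column sentinels (plus a backwards position walk) by computing the separator-column indices once, deriving (start, stop) bounds per number block, and folding each operator's column range forward, reading each column's digits directly from the rows.
import Mathlib
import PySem

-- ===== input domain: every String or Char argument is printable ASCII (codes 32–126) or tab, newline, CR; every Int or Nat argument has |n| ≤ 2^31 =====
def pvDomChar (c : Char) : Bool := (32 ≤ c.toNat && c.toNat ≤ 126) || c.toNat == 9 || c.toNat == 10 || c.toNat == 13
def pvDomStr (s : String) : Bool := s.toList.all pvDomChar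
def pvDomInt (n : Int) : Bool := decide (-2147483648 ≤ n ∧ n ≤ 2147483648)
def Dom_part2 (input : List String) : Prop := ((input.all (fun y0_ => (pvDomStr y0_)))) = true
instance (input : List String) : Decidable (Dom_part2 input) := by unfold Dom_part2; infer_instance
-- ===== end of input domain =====

-- B replaces A's char-by-char accumulation with flush sentinels by a separator-column scan
-- that yields (lo,hi) column bounds per number block, folded forward per operator column
-- (objective: simpler decomposition; equal return value on all inputs where A returns).

-- ===== PORT A =====
-- literal transliteration of A, split into named helpers for its phases:
-- pAStep = the body of A's column loop (flush per-row accumulators on an all-space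
-- column, else append the column's character to each row's accumulator);
-- pACol = the body of A's operator loop (collect column c of nums, walk positions
-- back-to-front, strip spaces, parse, then fold with + / *).
def pAStep (gridC : List (List Char)) (rows : Nat)
    (st : List (List (List Char)) × List (List Char)) (c : Nat) :
    List (List (List Char)) × List (List Char) :=
  if ((List.range rows).map (fun r => (gridC.getD r []).getD c ' ')).all (fun ch => ch == ' ') then
    ((List.range rows).map (fun r => st.1.getD r [] ++ [st.2.getD r []]),
     (List.range rows).map (fun _ => ([] : List Char)))
  else
    (st.1, (List.range rows).map (fun r => st.2.getD r [] ++ [(gridC.getD r []).getD c ' ']))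

def pACol (nums : List (List (List Char))) (ops : List (List Char)) (c : Nat) : Int :=
  let op := ops.getD c []
  let targets : List (List Char) := (List.range nums.length).map (fun r => (nums.getD r []).getD c [])
  let new_nums : List Int :=
    (PySem.List.pyRange (((targets.headD []).length : Int) - 1) (-1) (-1)).map (fun i =>
      let new_num : List Char := (List.range targets.length).map (fun r => (targets.getD r []).getD i.toNat ' ')
      let stripped := new_num.filter (fun ch => ch ≠ ' ')   -- "".join(new_num.split(" "))
      if stripped = [] then (0 : Int) else (PySem.Int.ofChars? stripped).getD 0)
  (List.range new_nums.length).foldl (fun col r =>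
      if op = ['+'] then col + new_nums.getD r 0 else col * new_nums.getD r 0)
    (if op = ['+'] then (0 : Int) else 1)

def part2 (input : List String) : Int :=
  let gridC : List (List Char) := input.map String.toList
  let rows : Nat := gridC.dropLast.length                      -- rows = len(input[:-1])
  let width : Nat := (gridC.headD []).length                   -- len(input[0]); Pre_ excludes input = []
  let st := (List.range width).foldl (pAStep gridC rows)
      ((List.range rows).map (fun _ => ([] : List (List Char))),
       (List.range rows).map (fun _ => ([] : List Char)))
  let nums : List (List (List Char)) := (List.range rows).map (fun r => st.1.getD r [] ++ [st.2.getD r []])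
  let ops : List (List Char) := (PySem.Chars.splitOn (gridC.getLastD []) [' ']).filter (fun o => o ≠ [])
  (List.range ops.length).foldl (fun total c => total + pACol nums ops c) 0

-- ===== PORT B =====
-- literal transliteration of B (Source B): collect separator columns, turn them into
-- (start, stop) bounds, then fold each operator's column range forward
-- (pBAcc = the body of Source B's operator loop).
def pBAcc (rows : List (List Char)) (op : List Char) (lo hi : Nat) : Int :=
  (List.range' lo (hi - lo)).foldl (fun acc j =>
      let s := (rows.map (fun r => r.getD j ' ')).filter (fun ch => ch ≠ ' ')
      let v : Int := if s = [] then 0 else (PySem.Int.ofChars? s).getD 0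
      if op = ['+'] then acc + v else acc * v)
    (if op = ['+'] then (0 : Int) else 1)

def part2_alt (input : List String) : Int :=
  let rows : List (List Char) := (input.map String.toList).dropLast
  let width : Nat := ((input.map String.toList).headD []).length
  let seps : List Nat := (List.range width).filter (fun c => rows.all (fun r => r.getD c ' ' == ' '))
  let bst := seps.foldl (fun (st : List (Nat × Nat) × Nat) c => (st.1 ++ [(st.2, c)], c + 1)) ([], 0)
  let bounds := bst.1 ++ [(bst.2, width)]
  let ops : List (List Char) := (PySem.Chars.splitOn ((input.map String.toList).getLastD []) [' ']).filter (fun o => o ≠ [])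
  (List.range ops.length).foldl (fun total k =>
    total + pBAcc rows (ops.getD k []) (bounds.getD k (0, 0)).1 (bounds.getD k (0, 0)).2) 0

-- ===== PRECONDITION & SPEC =====
-- helpers naming the grid geometry A's code implicitly walks (used by Pre_ and the proofs)
def pvRowsOf (input : List String) : List (List Char) := (input.map String.toList).dropLast
def pvWidthOf (input : List String) : Nat := ((input.map String.toList).headD []).length
def pvSepsOf (input : List String) : List Nat :=
  (List.range (pvWidthOf input)).filter (fun c => (pvRowsOf input).all (fun r => r.getD c ' ' == ' '))
def pvBoundsAux (seps : List Nat) (st : List (Nat × Nat) × Nat) : List (Nat × Nat) × Nat :=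
  seps.foldl (fun st c => (st.1 ++ [(st.2, c)], c + 1)) st
def pvBoundsOf (input : List String) : List (Nat × Nat) :=
  (pvBoundsAux (pvSepsOf input) ([], 0)).1 ++ [((pvBoundsAux (pvSepsOf input) ([], 0)).2, pvWidthOf input)]
def pvOpsOf (input : List String) : List (List Char) :=
  (PySem.Chars.splitOn ((input.map String.toList).getLastD []) [' ']).filter (fun o => o ≠ [])
def pvColStr (input : List String) (j : Nat) : List Char :=
  ((pvRowsOf input).map (fun r => r.getD j ' ')).filter (fun ch => ch ≠ ' ')

-- Pre_ = exactly the inputs on which the Python A returns normally: input non-empty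
-- (else IndexError on input[0]); every data row at least as wide as input[0] (else
-- IndexError on input[r][c]); an operator line alone must carry no operators (else
-- targets[0] IndexError); no more operators than number blocks (else nums[r][c]
-- IndexError); and every non-blank column string must parse as int (else ValueError).
def Pre_part2 (input : List String) : Prop :=
  input ≠ [] ∧
  (∀ r ∈ pvRowsOf input, pvWidthOf input ≤ r.length) ∧
  (pvRowsOf input = [] → pvOpsOf input = []) ∧
  (pvOpsOf input).length ≤ (pvSepsOf input).length + 1 ∧
  (∀ k ∈ List.range (pvOpsOf input).length,
    ∀ j ∈ List.range' ((pvBoundsOf input).getD k (0, 0)).1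
            (((pvBoundsOf input).getD k (0, 0)).2 - ((pvBoundsOf input).getD k (0, 0)).1),
      pvColStr input j = [] ∨ (PySem.Int.ofChars? (pvColStr input j)).isSome)
instance (input : List String) : Decidable (Pre_part2 input) := by unfold Pre_part2; infer_instance

def pvWitness_part2 : List String := ["1 2", "+ *"]

def Spec_part2 (input : List String) (out : Int) : Prop := out = part2_alt input
instance (input : List String) (out : Int) : Decidable (Spec_part2 input out) := by unfold Spec_part2; infer_instance

-- ===== CLAIM (what is proved, stated in full; the proofs are below) =====
def Claim_equal_part2 : Prop := ∀ (input : List String), Dom_part2 input → Pre_part2 input → Spec_part2 input (part2 input)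

-- ===== LEMMAS AND PROOFS =====

def pvChunk (row : List Char) (b : Nat × Nat) : List Char := (row.drop b.1).take (b.2 - b.1)

def pvSepB (R : List (List Char)) (c : Nat) : Bool := R.all (fun r => r.getD c ' ' == ' ')
def pvSepsUpTo (R : List (List Char)) (c : Nat) : List Nat := (List.range c).filter (pvSepB R)

-- collapse '(range xs.length).map (fun i => f (xs.getD i d))' to 'xs.map f'
theorem pvMapRangeGetD {α β : Type} (xs : List α) (f : α → β) (d : α) :
    (List.range xs.length).map (fun i => f (xs.getD i d)) = xs.map f := by
  apply List.ext_getElem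
  · simp
  · intro i h1 h2
    simp only [List.getElem_map, List.getElem_range, List.getD_eq_getElem?_getD]
    rw [List.getElem?_eq_getElem (by simp_all)]
    rfl

theorem pvFoldlRangeGetD {α β : Type} (xs : List α) (f : β → α → β) (d : α) (init : β) :
    (List.range xs.length).foldl (fun a i => f a (xs.getD i d)) init = xs.foldl f init := by
  induction xs using List.reverseRecOn generalizing init with
  | nil => simp
  | append_singleton ys y ih =>
      simp only [List.length_append, List.length_singleton, List.range_succ, List.foldl_append]
      rw [PySem.List.foldl_congr_mem _ _ (fun a i => f a (ys.getD i d)) init ?h, ih]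
      case h => intro a i hi; rw [List.getD_append _ _ _ _ (by simpa using List.mem_range.mp hi)]
      simp only [List.foldl_cons, List.foldl_nil]
      rw [List.getD_eq_getElem?_getD, List.getElem?_append_right (le_refl _)]
      simp

theorem pvFoldlIf (xs : List Int) (op : List Char) (init : Int) :
    (List.range xs.length).foldl
        (fun col r => if op = ['+'] then col + xs.getD r 0 else col * xs.getD r 0) init
      = xs.foldl (fun col v => if op = ['+'] then col + v else col * v) init :=
  pvFoldlRangeGetD xs (fun col v => if op = ['+'] then col + v else col * v) 0 init

theorem pvFoldlAddSum (xs : List Int) (a : Int) :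
    xs.foldl (fun col v => col + v) a = a + xs.sum := by
  simpa using PySem.List.foldl_add xs (fun v => v) a

theorem pvFoldlMulProd (xs : List Int) : xs.foldl (fun col v => col * v) 1 = xs.prod :=
  List.prod_eq_foldl.symm

theorem pvFoldlMulBody {b : Type} (l : List b) (g : b -> Int) (a : Int) :
    l.foldl (fun acc x => acc * g x) a = a * (l.map g).prod := by
  induction l generalizing a with
  | nil => simp
  | cons x xs ih => simp [ih, mul_assoc]

theorem pvChunkExtend (row : List Char) (s c : Nat) (hs : s ≤ c) (hc : c < row.length) :
    pvChunk row (s, c) ++ [row.getD c ' '] = pvChunk row (s, c + 1) := by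
  simp only [pvChunk]
  have h1 : c + 1 - s = (c - s) + 1 := by omega
  rw [h1, List.take_add_one]
  have h2 : (row.drop s)[c - s]? = some row[c] := by
    rw [List.getElem?_drop]
    rw [List.getElem?_eq_getElem (by omega)]
    congr 1
    congr 1
    omega
  rw [h2]
  simp [List.getD_eq_getElem?_getD, List.getElem?_eq_getElem hc]

theorem pvChunkLength (row : List Char) (b : Nat × Nat) (W : Nat)
    (hW : b.2 ≤ W) (hrow : W ≤ row.length) :
    (pvChunk row b).length = b.2 - b.1 := by
  simp [pvChunk]; omega

theorem pvChunkGetD (row : List Char) (b : Nat × Nat) (W i : Nat)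
    (hi' : i < b.2 - b.1) (hW : b.2 ≤ W) (hrow : W ≤ row.length) :
    (pvChunk row b).getD i ' ' = row.getD (b.1 + i) ' ' := by
  have h1 : b.1 + i < row.length := by omega
  simp only [pvChunk]
  rw [List.getD_eq_getElem?_getD, List.getElem?_take_of_lt hi', List.getElem?_drop,
      List.getElem?_eq_getElem (by omega), List.getD_eq_getElem?_getD, List.getElem?_eq_getElem h1]

theorem pvSepsUpTo_succ (R : List (List Char)) (c : Nat) :
    pvSepsUpTo R (c + 1) = pvSepsUpTo R c ++ if pvSepB R c then [c] else [] := by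
  by_cases h : pvSepB R c <;>
    simp [pvSepsUpTo, List.range_succ, List.filter_append, h]

theorem pvBoundsAux_append (l : List Nat) (c : Nat) (st : List (Nat × Nat) × Nat) :
    pvBoundsAux (l ++ [c]) st = ((pvBoundsAux l st).1 ++ [((pvBoundsAux l st).2, c)], c + 1) := by
  simp [pvBoundsAux, List.foldl_append]

theorem pvBoundsAux_length (l : List Nat) (acc : List (Nat × Nat)) (s : Nat) :
    (pvBoundsAux l (acc, s)).1.length = acc.length + l.length := by
  induction l generalizing acc s with
  | nil => simp [pvBoundsAux]
  | cons x xs ih =>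
      simp only [pvBoundsAux, List.foldl_cons] at *
      rw [ih]
      simp only [List.length_append, List.length_cons, List.length_nil]
      omega

theorem pvBounds_facts (R : List (List Char)) (c : Nat) :
    (pvBoundsAux (pvSepsUpTo R c) ([], 0)).2 ≤ c ∧
      ∀ b ∈ (pvBoundsAux (pvSepsUpTo R c) ([], 0)).1, b.1 ≤ b.2 ∧ b.2 ≤ c := by
  induction c with
  | zero => simp [pvSepsUpTo, pvBoundsAux]
  | succ c ih =>
      rw [pvSepsUpTo_succ]
      by_cases h : pvSepB R c
      · rw [if_pos h, pvBoundsAux_append]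
        refine ⟨le_refl _, ?_⟩
        intro b hb
        rcases List.mem_append.mp hb with hb | hb
        · have := ih.2 b hb; omega
        · simp at hb; subst hb; exact ⟨ih.1, by omega⟩
      · rw [if_neg h]
        simp only [List.append_nil]
        exact ⟨by omega, fun b hb => ⟨(ih.2 b hb).1, by have := (ih.2 b hb).2; omega⟩⟩

theorem pvGetD_dropLast {α : Type} (xs : List α) (r : Nat) (d : α) (h : r < xs.dropLast.length) :
    xs.getD r d = xs.dropLast.getD r d := by
  have h2 : r < xs.length := by simp at h ⊢; omega
  rw [List.getD_eq_getElem?_getD, List.getD_eq_getElem?_getD,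
      List.getElem?_eq_getElem h2, List.getElem?_eq_getElem h, List.getElem_dropLast]

theorem pvGetD_mem {α : Type} (xs : List α) (r : Nat) (d : α) (h : r < xs.length) :
    xs.getD r d ∈ xs := by
  rw [List.getD_eq_getElem?_getD, List.getElem?_eq_getElem h]
  exact List.getElem_mem h

theorem pvGetD_map {α β : Type} (l : List α) (f : α → β) (k : Nat) (d : β) (d' : α) (h : k < l.length) :
    (l.map f).getD k d = f (l.getD k d') := by
  rw [List.getD_eq_getElem?_getD, List.getElem?_map, List.getElem?_eq_getElem h,
      List.getD_eq_getElem?_getD, List.getElem?_eq_getElem h]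
  rfl

theorem pvHeadD_map_range {β : Type} (f : Nat → β) (n : Nat) (d : β) (h : 0 < n) :
    ((List.range n).map f).headD d = f 0 := by
  obtain ⟨m, rfl⟩ := Nat.exists_eq_add_of_lt h
  simp [List.range_succ_eq_map]

theorem pvTestEq (G : List (List Char)) (c : Nat) :
    ((List.range G.dropLast.length).map (fun r => (G.getD r []).getD c ' ')).all (fun ch => ch == ' ')
      = pvSepB G.dropLast c := by
  rw [List.map_congr_left (g := fun r => (G.dropLast.getD r []).getD c ' ')
        (fun r hr => by rw [pvGetD_dropLast G r [] (List.mem_range.mp hr)]),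
      pvMapRangeGetD G.dropLast (fun row => row.getD c ' ') [], List.all_map]
  rfl

theorem pvRangeRev (L : Nat) :
    PySem.List.pyRange ((L : Int) - 1) (-1) (-1)
      = ((List.range L).map (fun (j : Nat) => (j : Int))).reverse := by
  have h : (L : Int) - 1 + 1 = (L : Int) := by ring
  rw [PySem.List.pyRange_neg_one_eq_reverse, h, PySem.List.pyRange_one]
  simp

theorem pvMapRangeRev {β : Type} (L : Nat) (F : Int → β) :
    (PySem.List.pyRange ((L : Int) - 1) (-1) (-1)).map F
      = ((List.range L).map (fun (j : Nat) => F (j : Int))).reverse := by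
  rw [pvRangeRev, List.map_reverse, List.map_map]
  rfl

-- the invariant of A's column loop: after the first c columns, the finished chunks are
-- the slices at the separator bounds seen so far, and each accumulator holds the slice
-- from the last flush position to c
theorem pvStateA (G : List (List Char)) (W : Nat)
    (hlen : ∀ r ∈ G.dropLast, W ≤ r.length) :
    ∀ c, c ≤ W →
    (List.range c).foldl (pAStep G G.dropLast.length)
      ((List.range G.dropLast.length).map (fun _ => ([] : List (List Char))),
       (List.range G.dropLast.length).map (fun _ => ([] : List Char)))
    = ((List.range G.dropLast.length).map (fun r =>
          (pvBoundsAux (pvSepsUpTo G.dropLast c) ([], 0)).1.map (pvChunk (G.dropLast.getD r []))),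
       (List.range G.dropLast.length).map (fun r =>
          pvChunk (G.dropLast.getD r []) ((pvBoundsAux (pvSepsUpTo G.dropLast c) ([], 0)).2, c))) := by
  intro c
  induction c with
  | zero => simp [pvSepsUpTo, pvBoundsAux, pvChunk]
  | succ c ih =>
      intro hc
      rw [List.range_succ, List.foldl_append, ih (by omega)]
      simp only [List.foldl_cons, List.foldl_nil, pAStep]
      rw [pvTestEq]
      by_cases hsep : pvSepB G.dropLast c
      · rw [if_pos hsep, pvSepsUpTo_succ, if_pos hsep, pvBoundsAux_append]
        simp only [Prod.mk.injEq]
        constructor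
        · apply List.map_congr_left
          intro r hr
          have hr' := List.mem_range.mp hr
          rw [PySem.List.getD_map_range _ _ _ _ hr', PySem.List.getD_map_range _ _ _ _ hr',
              List.map_append]
          rfl
        · apply List.map_congr_left
          intro r hr
          simp [pvChunk]
      · rw [if_neg hsep, pvSepsUpTo_succ, if_neg hsep, List.append_nil]
        simp only [Prod.mk.injEq]
        constructor
        · trivial
        · apply List.map_congr_left
          intro r hr
          have hr' := List.mem_range.mp hr
          rw [PySem.List.getD_map_range _ _ _ _ hr',
              pvGetD_dropLast G r [] hr',
              pvChunkExtend _ _ _ (pvBounds_facts G.dropLast c).1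
                (by
                  have := hlen (G.dropLast.getD r []) (pvGetD_mem _ _ _ hr')
                  omega)]

-- the values A reads back from chunk k, position j, are the column characters at b.1 + j
theorem pvNewNumEq (R : List (List Char)) (b : Nat × Nat) (W j : Nat)
    (hj : j < b.2 - b.1) (hW : b.2 ≤ W) (hlen : ∀ r ∈ R, W ≤ r.length) :
    (List.range ((List.range R.length).map (fun r => pvChunk (R.getD r []) b)).length).map
      (fun r => (((List.range R.length).map (fun r => pvChunk (R.getD r []) b)).getD r []).getD j ' ')
    = R.map (fun row => row.getD (b.1 + j) ' ') := by
  simp only [List.length_map, List.length_range]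
  have h1 : ∀ r ∈ List.range R.length,
      (((List.range R.length).map (fun r => pvChunk (R.getD r []) b)).getD r []).getD j ' '
        = (R.getD r []).getD (b.1 + j) ' ' := by
    intro r hr
    rw [PySem.List.getD_map_range _ _ _ _ (List.mem_range.mp hr),
        pvChunkGetD _ _ W _ hj hW (hlen _ (pvGetD_mem _ _ _ (List.mem_range.mp hr)))]
  rw [List.map_congr_left h1, pvMapRangeGetD R (fun row => row.getD (b.1 + j) ' ') []]

-- A's operator-column computation, on nums in chunk form, equals B's forward fold
theorem pvColEq (R : List (List Char)) (BB : List (Nat × Nat)) (ops : List (List Char)) (k W : Nat)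
    (hlen : ∀ r ∈ R, W ≤ r.length) (hn : 0 < R.length) (hkB : k < BB.length)
    (hB : ∀ b ∈ BB, b.1 ≤ b.2 ∧ b.2 ≤ W) :
    pACol ((List.range R.length).map (fun r => BB.map (pvChunk (R.getD r [])))) ops k
      = pBAcc R (ops.getD k []) (BB.getD k (0, 0)).1 (BB.getD k (0, 0)).2 := by
  have hmem : BB.getD k (0, 0) ∈ BB := pvGetD_mem _ _ _ hkB
  obtain ⟨hlohi, hhiW⟩ := hB _ hmem
  simp only [pACol, pBAcc]
  have htargets : (List.range ((List.range R.length).map (fun r => BB.map (pvChunk (R.getD r [])))).length).map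
      (fun r => (((List.range R.length).map (fun r => BB.map (pvChunk (R.getD r [])))).getD r []).getD k [])
      = (List.range R.length).map (fun r => pvChunk (R.getD r []) (BB.getD k (0, 0))) := by
    simp only [List.length_map, List.length_range]
    have h1 : ∀ r ∈ List.range R.length,
        (((List.range R.length).map (fun r => BB.map (pvChunk (R.getD r [])))).getD r []).getD k []
          = pvChunk (R.getD r []) (BB.getD k (0, 0)) := by
      intro r hr
      rw [PySem.List.getD_map_range _ _ _ _ (List.mem_range.mp hr), pvGetD_map _ _ _ _ (0, 0) hkB]
    exact List.map_congr_left h1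
  rw [htargets, pvHeadD_map_range _ _ _ hn,
      pvChunkLength _ _ W hhiW (hlen _ (pvGetD_mem _ _ _ hn)),
      pvMapRangeRev, pvFoldlIf]
  by_cases hop : ops.getD k [] = ['+']
  · simp only [hop, if_true]
    rw [pvFoldlAddSum, List.sum_reverse, PySem.List.foldl_add, List.range'_eq_map_range, List.map_map]
    congr 1
    congr 1
    apply List.map_congr_left
    intro j hj
    have hj' := List.mem_range.mp hj
    simp only [Int.toNat_natCast]
    rw [pvNewNumEq R (BB.getD k (0, 0)) W j hj' hhiW hlen]
    rfl
  · simp only [hop, if_false]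
    rw [pvFoldlMulProd, List.prod_reverse, pvFoldlMulBody, List.range'_eq_map_range, List.map_map,
        one_mul]
    congr 1
    apply List.map_congr_left
    intro j hj
    have hj' := List.mem_range.mp hj
    simp only [Int.toNat_natCast]
    rw [pvNewNumEq R (BB.getD k (0, 0)) W j hj' hhiW hlen]
    rfl

theorem pvMainEq (input : List String) (h : Pre_part2 input) : part2 input = part2_alt input := by
  obtain ⟨hne, hlen, hrops, hopslen, _hparse⟩ := h
  simp only [part2, part2_alt]
  simp only [pvRowsOf, pvWidthOf] at hlen
  rw [pvStateA (input.map String.toList) (((input.map String.toList).headD []).length) hlen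
      (((input.map String.toList).headD []).length) (le_refl _)]
  set G := input.map String.toList with hG
  set R := G.dropLast with hR
  set W := (G.headD []).length with hWd
  set P := (List.range W).filter (fun c => R.all (fun r => r.getD c ' ' == ' ')) with hP
  set BA := List.foldl (fun (st : List (Nat × Nat) × Nat) c => (st.1 ++ [(st.2, c)], c + 1)) ([], 0) P with hBA
  rw [show pvSepsUpTo R W = P from rfl]
  rw [show pvBoundsAux P ([], 0) = BA from rfl]
  set O := (PySem.Chars.splitOn (G.getLastD []) [' ']).filter (fun o => o ≠ []) with hOd
  have hnums :
      (List.range R.length).map (fun r =>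
        ((List.range R.length).map (fun r => BA.1.map (pvChunk (R.getD r []))),
         (List.range R.length).map (fun r => pvChunk (R.getD r []) (BA.2, W))).1.getD r [] ++
        [((List.range R.length).map (fun r => BA.1.map (pvChunk (R.getD r []))),
          (List.range R.length).map (fun r => pvChunk (R.getD r []) (BA.2, W))).2.getD r []])
      = (List.range R.length).map (fun r => (BA.1 ++ [(BA.2, W)]).map (pvChunk (R.getD r []))) := by
    apply List.map_congr_left
    intro r hr
    have hr' := List.mem_range.mp hr
    show ((List.range R.length).map (fun r => BA.1.map (pvChunk (R.getD r [])))).getD r [] ++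
        [((List.range R.length).map (fun r => pvChunk (R.getD r []) (BA.2, W))).getD r []] = _
    rw [PySem.List.getD_map_range _ _ _ _ hr', PySem.List.getD_map_range _ _ _ _ hr', List.map_append]
    rfl
  rw [hnums]
  refine PySem.List.foldl_congr_mem _ _ _ _ ?_
  intro acc k hk
  have hk' := List.mem_range.mp hk
  have hOpre : O = pvOpsOf input := rfl
  have hn : 0 < R.length := by
    rcases Nat.eq_zero_or_pos R.length with h0 | h0
    · exfalso
      have hO0 : pvOpsOf input = [] := hrops (show pvRowsOf input = [] from List.length_eq_zero_iff.mp h0)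
      rw [hOpre, hO0] at hk'
      simp at hk'
    · exact h0
  have hkB : k < (BA.1 ++ [(BA.2, W)]).length := by
    have hlen1 : BA.1.length = P.length := by
      have h := pvBoundsAux_length P [] 0
      simpa using h
    have hPeq : pvSepsOf input = P := rfl
    have hops := hopslen
    rw [hPeq] at hops
    rw [hOpre] at hk'
    rw [List.length_append, hlen1]
    simp only [List.length_cons, List.length_nil]
    omega
  have hB : ∀ b ∈ BA.1 ++ [(BA.2, W)], b.1 ≤ b.2 ∧ b.2 ≤ W := by
    have h2 := pvBounds_facts R W
    intro b hb
    rcases List.mem_append.mp hb with hb | hb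
    · exact h2.2 b hb
    · simp at hb
      subst hb
      exact ⟨h2.1, le_refl _⟩
  congr 1
  exact pvColEq R (BA.1 ++ [(BA.2, W)]) O k W hlen hn hkB hB

-- ===== VERDICT (by name: the statement is the Claim_ definition above) =====
theorem part2_spec : Claim_equal_part2 := by
  intro input _ hpre
  show part2 input = part2_alt input
  exact pvMainEq input hpre
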